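-- pv_equiv track=rewrite | github.com/wamaco/siopao | lab0/lab0b.py | least_jumps
-- ===== SOURCE A (Python) =====
-- from collections import deque
--
-- Coord = tuple[int, int]
--
-- def is_safe(coord: Coord, grid: list[list[int]]) -> bool:
--     r, c = coord
--     if 0 <= r < len(grid) and 0 <= c < len(grid[0]):
--         return True
--     else:
--         return False
--
-- dirs = [(0, 1), (0, -1), (1, 0), (-1, 0)] # up, down, left, right
--
-- def least_jumps(grid: list[list[int]], d: int, u: int, s: Coord, e: Coord) -> int | None:
--     if s == e: # base case: starting point IS the end point
--         return 0
--
--     visited = set([s])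
--     queue = deque([(s, 0)])
--
--     while len(queue) > 0: # while there's still something in the queue...
--         (cr, cc), dist = queue.popleft() # get the current cell's info
--         for r, c in dirs: # up, down, left, right
--             nr, nc = cr+r, cc+c
--
--             if is_safe((nr, nc), grid): # if current move is in bounds
--                 # 1st check: if it is safe to JUMP
--                 height_diff = grid[nr][nc] - grid[cr][cc]
--                 if height_diff > u: # too tall
--                     continue
--                 if height_diff < -d: # too deep (pause)
--                     continue
--
--                 # 2nd check: sensus ahh
--                 if (nr, nc) == e: # if current neighbor is the end point
--                     return dist + 1
--                 if (nr, nc) not in visited: # just the usual neighbor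
--                     visited.add((nr, nc))
--                     queue.append(((nr, nc), dist+1))
--
--     return None # this means the BFS has finished and it didn't find a path s -> e
-- ===== SOURCE B (Python) =====
-- def least_jumps(grid, d, u, s, e):
--     if s == e:
--         return 0
--     rows = len(grid)
--     cols = len(grid[0]) if grid else 0
--
--     def neighbors(cell):
--         cr, cc = cell
--         out = []
--         for nr, nc in ((cr, cc + 1), (cr, cc - 1), (cr + 1, cc), (cr - 1, cc)):
--             if 0 <= nr < rows and 0 <= nc < cols and -d <= grid[nr][nc] - grid[cr][cc] <= u:
--                 out.append((nr, nc))
--         return out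
--
--     # fixed-point saturation: reach = cells reachable in <= depth jumps (e excluded)
--     reach = {s}
--     depth = 0
--     while True:
--         depth += 1
--         new = reach | {nb for cell in reach for nb in neighbors(cell)}
--         if e in new:
--             return depth
--         if len(new) == len(reach):
--             return None
--         reach = new
-- ===== Notes on version B (the rewrite author's own statement) =====
-- stated objective: alternative
-- what changed: Replaces the BFS (FIFO queue of distance-tagged nodes with an enqueue-time visited set) by fixed-point reachable-set saturation: each round recomputes the neighbour closure of the whole reached set, returns the round number when the end cell appears, and stops when the set stops growing; no queue, frontier or per-node distance is kept.
-- outside the precondition, e.g. on least_jumps([[0, 0], [0]], 5, 5, (0, 0), (1, 0)): A returns 1, B returns 1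
import Mathlib
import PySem

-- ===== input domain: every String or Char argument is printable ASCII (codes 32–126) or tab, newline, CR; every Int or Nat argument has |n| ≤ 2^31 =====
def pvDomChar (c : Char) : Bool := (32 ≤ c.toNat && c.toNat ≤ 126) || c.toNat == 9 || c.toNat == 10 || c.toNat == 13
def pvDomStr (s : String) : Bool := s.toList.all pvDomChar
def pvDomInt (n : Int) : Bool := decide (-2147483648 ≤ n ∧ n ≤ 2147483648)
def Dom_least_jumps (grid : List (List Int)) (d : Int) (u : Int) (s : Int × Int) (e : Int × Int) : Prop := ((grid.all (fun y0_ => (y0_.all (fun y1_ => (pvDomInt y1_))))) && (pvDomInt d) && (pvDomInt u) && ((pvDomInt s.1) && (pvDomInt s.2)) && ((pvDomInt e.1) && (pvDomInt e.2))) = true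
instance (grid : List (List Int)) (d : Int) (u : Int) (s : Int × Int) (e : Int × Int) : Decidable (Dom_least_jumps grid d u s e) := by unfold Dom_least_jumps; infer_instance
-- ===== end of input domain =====

-- B replaces A's queue-based BFS by fixed-point reachable-set saturation (re-derive the neighbour
-- closure of the whole reached set each round until the end cell appears or the set stops growing);
-- same results, B does strictly more work per round (objective: alternative).

-- ===== PORT A =====

-- grid[r][c] as A's Python writes it (Python negative indices wrap; the pyGetD default 0 is
-- only reached where Python raises IndexError, excluded by Pre_).
def ljCellA (grid : List (List Int)) (r c : Int) : Int :=
  PySem.List.pyGetD (PySem.List.pyGetD grid r []) c 0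

-- is_safe(coord, grid): 0 <= r < len(grid) and 0 <= c < len(grid[0]) (short-circuit: for
-- grid = [] the first conjunct is already false, and headD [] makes the second total).
def ljIsSafe (grid : List (List Int)) (r c : Int) : Bool :=
  decide (0 ≤ r) && decide (r < (grid.length : Int)) && decide (0 ≤ c) && decide (c < (((grid.headD []).length : Nat) : Int))

def ljDirs : List (Int × Int) := [(0, 1), (0, -1), (1, 0), (-1, 0)]

-- one iteration of A's `for r, c in dirs` body; .inl = the early `return dist + 1`
def ljAStep (grid : List (List Int)) (d u : Int) (e : Int × Int) (cr cc dist : Int)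
    (st : Sum Int (PySem.Set (Int × Int) × List ((Int × Int) × Int))) (dir : Int × Int) :
    Sum Int (PySem.Set (Int × Int) × List ((Int × Int) × Int)) :=
  match st with
  | .inl a => .inl a
  | .inr (v, q) =>
    let nr := cr + dir.1
    let nc := cc + dir.2
    if ljIsSafe grid nr nc then
      let hd := ljCellA grid nr nc - ljCellA grid cr cc
      if hd > u then .inr (v, q)
      else if hd < -d then .inr (v, q)
      else if (nr, nc) = e then .inl (dist + 1)
      else if PySem.Set.contains v (nr, nc) then .inr (v, q)
      else .inr (PySem.Set.add v (nr, nc), q ++ [((nr, nc), dist + 1)])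
    else .inr (v, q)

-- termination measure helpers: the in-bounds cells and how many are not yet visited
def ljCells (grid : List (List Int)) : List (Int × Int) :=
  (List.range grid.length).flatMap (fun r => (List.range (grid.headD []).length).map (fun c => ((r : Int), (c : Int))))

def ljUnvis (grid : List (List Int)) (v : PySem.Set (Int × Int)) : Nat :=
  (ljCells grid).countP (fun p => !PySem.Set.contains v p)

theorem lj_countP_mono {α : Type} (p q : α → Bool)
    (himp : ∀ a, q a = true → p a = true) :
    ∀ (m : List α), m.countP q ≤ m.countP p := by
  intro m
  induction m with
  | nil => simp
  | cons b tb ihb =>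
    simp only [List.countP_cons]
    by_cases hb : q b = true
    · rw [if_pos hb, if_pos (himp b hb)]; omega
    · rw [if_neg hb]; split <;> omega

theorem lj_countP_lt {α : Type} (l : List α) (p q : α → Bool)
    (himp : ∀ a, q a = true → p a = true) (x : α) (hx : x ∈ l)
    (hp : p x = true) (hq : q x = false) : l.countP q < l.countP p := by
  induction l with
  | nil => cases hx
  | cons a t ih =>
    simp only [List.countP_cons]
    rcases List.mem_cons.mp hx with rfl | hxt
    · rw [if_neg (by simp [hq]), if_pos hp]
      have := lj_countP_mono p q himp t
      omega
    · have := ih hxt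
      by_cases hb : q a = true
      · rw [if_pos hb, if_pos (himp a hb)]; omega
      · rw [if_neg hb]; split <;> omega

theorem lj_mem_cells' (grid : List (List Int)) (rn cn : Nat)
    (hr : rn < grid.length) (hc : cn < (grid.headD []).length) :
    ((rn : Int), (cn : Int)) ∈ ljCells grid := by
  unfold ljCells
  apply List.mem_flatMap.mpr
  refine ⟨rn, by simpa using hr, ?_⟩
  apply List.mem_map.mpr
  exact ⟨(cn : Int), by simpa using hc, rfl⟩

theorem lj_mem_cells (grid : List (List Int)) (r c : Int)
    (h0 : 0 ≤ r) (h1 : r < (grid.length : Int))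
    (h2 : 0 ≤ c) (h3 : c < (((grid.headD []).length : Nat) : Int)) :
    (r, c) ∈ ljCells grid := by
  have hrc : (r, c) = (((r.toNat : Nat) : Int), ((c.toNat : Nat) : Int)) := by
    simp [Int.toNat_of_nonneg h0, Int.toNat_of_nonneg h2]
  rw [hrc]
  exact lj_mem_cells' grid r.toNat c.toNat (by omega) (by omega)

theorem lj_unvis_add_lt (grid : List (List Int)) (v : PySem.Set (Int × Int)) (x : Int × Int)
    (hin : x ∈ ljCells grid) (hx : PySem.Set.contains v x = false) :
    ljUnvis grid (PySem.Set.add v x) < ljUnvis grid v := by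
  unfold ljUnvis
  refine lj_countP_lt (ljCells grid) (fun y => !PySem.Set.contains v y)
    (fun y => !PySem.Set.contains (PySem.Set.add v x) y) ?_ x hin ?_ ?_
  · intro a ha
    cases hcv : PySem.Set.contains v a with
    | false => simp only [hcv, Bool.not_false]
    | true =>
      exfalso
      simp at ha
      exact ha.1 ((PySem.Set.contains_iff v a).mp hcv)
  · simp only [hx, Bool.not_false]
  · have hmem : x ∈ PySem.Set.add v x := (PySem.Set.mem_add v x x).mpr (Or.inr rfl)
    rw [← PySem.Set.contains_iff] at hmem
    simp only [hmem, Bool.not_true]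

theorem ljAStep_bound (grid : List (List Int)) (d u : Int) (e : Int × Int) (cr cc dist : Int)
    (v : PySem.Set (Int × Int)) (q : List ((Int × Int) × Int)) (dir : Int × Int)
    (v' : PySem.Set (Int × Int)) (q' : List ((Int × Int) × Int))
    (h : ljAStep grid d u e cr cc dist (.inr (v, q)) dir = .inr (v', q')) :
    4 * ljUnvis grid v' + q'.length ≤ 4 * ljUnvis grid v + q.length := by
  simp only [ljAStep] at h
  split_ifs at h with h1 h2 h3 h4 h5
  all_goals rw [Sum.inr.injEq, Prod.mk.injEq] at h
  all_goals obtain ⟨rfl, rfl⟩ := h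
  all_goals try simp only [List.length_append, List.length_cons, List.length_nil]
  all_goals try omega
  simp only [ljIsSafe, Bool.and_eq_true, decide_eq_true_eq] at h1
  have hmem := lj_mem_cells grid (cr + dir.1) (cc + dir.2) h1.1.1.1 h1.1.1.2 h1.1.2 h1.2
  have hlt := lj_unvis_add_lt grid v (cr + dir.1, cc + dir.2) hmem (by simpa using h5)
  omega

theorem ljAFold_inl (grid : List (List Int)) (d u : Int) (e : Int × Int) (cr cc dist : Int)
    (a : Int) (ds : List (Int × Int)) :
    List.foldl (ljAStep grid d u e cr cc dist) (.inl a) ds = .inl a := by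
  induction ds with
  | nil => rfl
  | cons x t ih => simpa [ljAStep] using ih

theorem ljAFold_bound (grid : List (List Int)) (d u : Int) (e : Int × Int) (cr cc dist : Int)
    (ds : List (Int × Int)) (v : PySem.Set (Int × Int)) (q : List ((Int × Int) × Int))
    (v' : PySem.Set (Int × Int)) (q' : List ((Int × Int) × Int))
    (h : List.foldl (ljAStep grid d u e cr cc dist) (.inr (v, q)) ds = .inr (v', q')) :
    4 * ljUnvis grid v' + q'.length ≤ 4 * ljUnvis grid v + q.length := by
  induction ds generalizing v q with
  | nil => injection h with h; injection h with hv hq; subst hv; subst hq; omega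
  | cons x t ih =>
    rw [List.foldl_cons] at h
    cases hstep : ljAStep grid d u e cr cc dist (.inr (v, q)) x with
    | inl a => rw [hstep, ljAFold_inl] at h; cases h
    | inr p =>
      obtain ⟨v1, q1⟩ := p
      rw [hstep] at h
      have b1 := ljAStep_bound grid d u e cr cc dist v q x v1 q1 hstep
      have b2 := ih v1 q1 h
      omega

-- A's `while len(queue) > 0` loop (deque.popleft = head, append = ++ [·])
def loopA (grid : List (List Int)) (d u : Int) (e : Int × Int)
    (v : PySem.Set (Int × Int)) (q : List ((Int × Int) × Int)) : Option Int :=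
  match q with
  | [] => none
  | ((cr, cc), dist) :: t =>
    match h : List.foldl (ljAStep grid d u e cr cc dist) (.inr (v, t)) ljDirs with
    | .inl ans => some ans
    | .inr (v', q') => loopA grid d u e v' q'
termination_by 4 * ljUnvis grid v + q.length
decreasing_by
  have := ljAFold_bound grid d u e cr cc dist ljDirs v t v' q' h
  simp only [List.length_cons]; omega

def least_jumps (grid : List (List Int)) (d : Int) (u : Int) (s : Int × Int) (e : Int × Int) : Option Int :=
  if s = e then some 0
  else loopA grid d u e (PySem.Set.ofList [s]) [(s, 0)]

-- ===== PORT B =====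

-- grid[r][c] as B's Python writes it
def ljCellB (grid : List (List Int)) (r c : Int) : Int :=
  PySem.List.pyGetD (PySem.List.pyGetD grid r []) c 0

-- the four candidate neighbour coordinates B's `neighbors` loops over
def ljNbrs (cr cc : Int) : List (Int × Int) := [(cr, cc + 1), (cr, cc - 1), (cr + 1, cc), (cr - 1, cc)]

-- B's neighbors(cell): keep those in bounds (rows = len(grid), cols = len(grid[0]) if grid else 0)
-- whose height difference is admissible
def ljNbrsB (grid : List (List Int)) (d u : Int) (cell : Int × Int) : List (Int × Int) :=
  (ljNbrs cell.1 cell.2).filter (fun nb =>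
    decide (0 ≤ nb.1) && decide (nb.1 < (grid.length : Int)) && decide (0 ≤ nb.2) && decide (nb.2 < (((grid.headD []).length : Nat) : Int)) &&
    decide (-d ≤ ljCellB grid nb.1 nb.2 - ljCellB grid cell.1 cell.2) && decide (ljCellB grid nb.1 nb.2 - ljCellB grid cell.1 cell.2 ≤ u))

-- B's `new = reach | {nb for cell in reach for nb in neighbors(cell)}`
def ljSatNew (grid : List (List Int)) (d u : Int) (reach : PySem.Set (Int × Int)) : PySem.Set (Int × Int) :=
  List.foldl (fun acc cell => PySem.Set.update acc (ljNbrsB grid d u cell)) reach reach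

-- termination helper for loopSat: the closure fold only APPENDS fresh in-bounds cells
theorem ljSatFold (grid : List (List Int)) (d u : Int) (l : List (Int × Int)) :
    ∀ acc : PySem.Set (Int × Int), ∃ t,
      List.foldl (fun a c => PySem.Set.update a (ljNbrsB grid d u c)) acc l = acc ++ t ∧
      ∀ x ∈ t, x ∉ acc ∧ ∃ c ∈ l, x ∈ ljNbrsB grid d u c := by
  induction l with
  | nil => intro acc; exact ⟨[], by simp, by simp⟩
  | cons c l ih =>
    intro acc
    rw [List.foldl_cons, PySem.Set.update_eq_append_filter]
    obtain ⟨t2, heq, ht2⟩ := ih (acc ++ (PySem.Set.ofList (ljNbrsB grid d u c)).filter (fun y => !(PySem.Set.contains acc y)))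
    refine ⟨(PySem.Set.ofList (ljNbrsB grid d u c)).filter (fun y => !(PySem.Set.contains acc y)) ++ t2, by rw [heq, List.append_assoc], ?_⟩
    intro x hx
    rcases List.mem_append.mp hx with hx1 | hx2
    · obtain ⟨hxin, hxnot⟩ := List.mem_filter.mp hx1
      exact ⟨by simpa using hxnot, c, List.mem_cons_self, (PySem.Set.mem_ofList _ _).mp hxin⟩
    · obtain ⟨hnot, c', hc', hx'⟩ := ht2 x hx2
      exact ⟨fun hmem => hnot (List.mem_append.mpr (Or.inl hmem)), c', List.mem_cons_of_mem _ hc', hx'⟩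

theorem lj_mem_cells_of_nbrsB (grid : List (List Int)) (d u : Int) (cell x : Int × Int)
    (h : x ∈ ljNbrsB grid d u cell) : x ∈ ljCells grid := by
  obtain ⟨-, hcond⟩ := List.mem_filter.mp h
  simp only [Bool.and_eq_true, decide_eq_true_eq] at hcond
  have := lj_mem_cells grid x.1 x.2 hcond.1.1.1.1.1 hcond.1.1.1.1.2 hcond.1.1.1.2 hcond.1.1.2
  simpa using this

theorem ljSatNew_lt (grid : List (List Int)) (d u : Int) (reach : PySem.Set (Int × Int))
    (h : (ljSatNew grid d u reach).length ≠ reach.length) :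
    ljUnvis grid (ljSatNew grid d u reach) < ljUnvis grid reach := by
  obtain ⟨t, heq, ht⟩ := ljSatFold grid d u reach reach
  rw [ljSatNew] at h ⊢
  match t, heq, ht with
  | [], heq, _ => rw [heq] at h; simp at h
  | x :: ts, heq, ht =>
    obtain ⟨hxnot, c, hc, hxn⟩ := ht x List.mem_cons_self
    unfold ljUnvis
    refine lj_countP_lt (ljCells grid) (fun y => !PySem.Set.contains reach y)
      (fun y => !PySem.Set.contains (List.foldl (fun a c => PySem.Set.update a (ljNbrsB grid d u c)) reach reach) y)
      ?_ x (lj_mem_cells_of_nbrsB grid d u c x hxn) ?_ ?_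
    · intro a ha
      have hanew : a ∉ List.foldl (fun a c => PySem.Set.update a (ljNbrsB grid d u c)) reach reach := by
        simpa using ha
      have har : a ∉ reach := fun hm => hanew (by rw [heq]; exact List.mem_append.mpr (Or.inl hm))
      simpa using har
    · simpa using hxnot
    · have hmem : x ∈ List.foldl (fun a c => PySem.Set.update a (ljNbrsB grid d u c)) reach reach := by
        rw [heq]; exact List.mem_append.mpr (Or.inr List.mem_cons_self)
      simpa using hmem

-- B's `while True` loop: one recursion step per saturation round
def loopSat (grid : List (List Int)) (d u : Int) (e : Int × Int)
    (reach : PySem.Set (Int × Int)) (depth : Int) : Option Int :=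
  if PySem.Set.contains (ljSatNew grid d u reach) e then some (depth + 1)
  else if (ljSatNew grid d u reach).length = reach.length then none
  else loopSat grid d u e (ljSatNew grid d u reach) (depth + 1)
termination_by ljUnvis grid reach
decreasing_by exact ljSatNew_lt grid d u reach (by assumption)

def least_jumps_alt (grid : List (List Int)) (d : Int) (u : Int) (s : Int × Int) (e : Int × Int) : Option Int :=
  if s = e then some 0
  else loopSat grid d u e (PySem.Set.ofList [s]) 0

-- ===== PRECONDITION & SPEC =====

-- Pre_ excludes grids whose first row is longer than some later row, and out-of-grid start cells
-- that have an in-bounds neighbour but whose (Python-wrapped) index into the grid is invalid: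
-- on such inputs A may raise IndexError (when BFS reaches a short row, resp. when it reads the
-- start cell's height), which the total ports cannot mirror.
def Pre_least_jumps (grid : List (List Int)) (d : Int) (u : Int) (s : Int × Int) (e : Int × Int) : Prop :=
  (∀ row ∈ grid, (grid.headD []).length ≤ row.length) ∧
  (s = e ∨
   (∀ nb ∈ ([(s.1, s.2 + 1), (s.1, s.2 - 1), (s.1 + 1, s.2), (s.1 - 1, s.2)] : List (Int × Int)),
      ¬ (0 ≤ nb.1 ∧ nb.1 < (grid.length : Int) ∧ 0 ≤ nb.2 ∧ nb.2 < (((grid.headD []).length : Nat) : Int))) ∨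
   ((PySem.List.pyGet? grid s.1).bind (fun row => PySem.List.pyGet? row s.2)).isSome = true)
instance (grid : List (List Int)) (d : Int) (u : Int) (s : Int × Int) (e : Int × Int) : Decidable (Pre_least_jumps grid d u s e) := by unfold Pre_least_jumps; infer_instance

def pvWitness_least_jumps : List (List Int) × Int × Int × (Int × Int) × (Int × Int) :=
  ([[0, 3], [0, 9]], 1, 1, (0, 0), (1, 1))

def Spec_least_jumps (grid : List (List Int)) (d : Int) (u : Int) (s : Int × Int) (e : Int × Int) (out : Option Int) : Prop := out = least_jumps_alt grid d u s e
instance (grid : List (List Int)) (d : Int) (u : Int) (s : Int × Int) (e : Int × Int) (out : Option Int) : Decidable (Spec_least_jumps grid d u s e out) := by unfold Spec_least_jumps; infer_instance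

-- ===== CLAIM (what is proved, stated in full; the proofs are below) =====
def Claim_equal_least_jumps : Prop := ∀ (grid : List (List Int)) (d : Int) (u : Int) (s : Int × Int) (e : Int × Int), Dom_least_jumps grid d u s e → Pre_least_jumps grid d u s e → Spec_least_jumps grid d u s e (least_jumps grid d u s e)

-- ===== LEMMAS AND PROOFS =====

-- Proof-internal intermediate M: a level-synchronized BFS (visited set + per-level frontier).
-- We prove A = M (queue split by levels) and M = B (the frontier generates exactly the growth
-- of the saturated set), hence A = B.

-- one iteration of M's neighbour loop; .inl = early return of the depth dep
def ljMStep (grid : List (List Int)) (d u : Int) (e : Int × Int) (dep cr cc : Int)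
    (st : Sum Int (PySem.Set (Int × Int) × List (Int × Int))) (nb : Int × Int) :
    Sum Int (PySem.Set (Int × Int) × List (Int × Int)) :=
  match st with
  | .inl a => .inl a
  | .inr (v, nxt) =>
    if decide (0 ≤ nb.1) && decide (nb.1 < (grid.length : Int)) && decide (0 ≤ nb.2) && decide (nb.2 < (((grid.headD []).length : Nat) : Int)) then
      let diff := ljCellB grid nb.1 nb.2 - ljCellB grid cr cc
      if -d ≤ diff ∧ diff ≤ u then
        if nb = e then .inl dep
        else if PySem.Set.contains v nb then .inr (v, nxt)
        else .inr (PySem.Set.add v nb, nxt ++ [nb])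
      else .inr (v, nxt)
    else .inr (v, nxt)

-- M's whole neighbour loop for one frontier node
def ljMNode (grid : List (List Int)) (d u : Int) (e : Int × Int) (dep : Int)
    (st : Sum Int (PySem.Set (Int × Int) × List (Int × Int))) (node : Int × Int) :
    Sum Int (PySem.Set (Int × Int) × List (Int × Int)) :=
  match st with
  | .inl a => .inl a
  | .inr (v, nxt) => List.foldl (ljMStep grid d u e dep node.1 node.2) (.inr (v, nxt)) (ljNbrs node.1 node.2)

theorem ljMStep_bound (grid : List (List Int)) (d u : Int) (e : Int × Int) (dep cr cc : Int)
    (v : PySem.Set (Int × Int)) (nxt : List (Int × Int)) (nb : Int × Int)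
    (v' : PySem.Set (Int × Int)) (nxt' : List (Int × Int))
    (h : ljMStep grid d u e dep cr cc (.inr (v, nxt)) nb = .inr (v', nxt')) :
    4 * ljUnvis grid v' + nxt'.length ≤ 4 * ljUnvis grid v + nxt.length := by
  simp only [ljMStep] at h
  split_ifs at h with h1 h2 h3 h4
  all_goals rw [Sum.inr.injEq, Prod.mk.injEq] at h
  all_goals obtain ⟨rfl, rfl⟩ := h
  all_goals try simp only [List.length_append, List.length_cons, List.length_nil]
  all_goals try omega
  simp only [Bool.and_eq_true, decide_eq_true_eq] at h1
  have hmem := lj_mem_cells grid nb.1 nb.2 h1.1.1.1 h1.1.1.2 h1.1.2 h1.2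
  have hlt := lj_unvis_add_lt grid v nb hmem (by simpa using h4)
  omega

theorem ljMFold_inl (grid : List (List Int)) (d u : Int) (e : Int × Int) (dep cr cc : Int)
    (a : Int) (ds : List (Int × Int)) :
    List.foldl (ljMStep grid d u e dep cr cc) (.inl a) ds = .inl a := by
  induction ds with
  | nil => rfl
  | cons x t ih => simpa [ljMStep] using ih

theorem ljMFold_bound (grid : List (List Int)) (d u : Int) (e : Int × Int) (dep cr cc : Int)
    (ds : List (Int × Int)) (v : PySem.Set (Int × Int)) (nxt : List (Int × Int))
    (v' : PySem.Set (Int × Int)) (nxt' : List (Int × Int))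
    (h : List.foldl (ljMStep grid d u e dep cr cc) (.inr (v, nxt)) ds = .inr (v', nxt')) :
    4 * ljUnvis grid v' + nxt'.length ≤ 4 * ljUnvis grid v + nxt.length := by
  induction ds generalizing v nxt with
  | nil => injection h with h; injection h with hv hq; subst hv; subst hq; omega
  | cons x t ih =>
    rw [List.foldl_cons] at h
    cases hstep : ljMStep grid d u e dep cr cc (.inr (v, nxt)) x with
    | inl a => rw [hstep, ljMFold_inl] at h; cases h
    | inr p =>
      obtain ⟨v1, q1⟩ := p
      rw [hstep] at h
      have b1 := ljMStep_bound grid d u e dep cr cc v nxt x v1 q1 hstep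
      have b2 := ih v1 q1 h
      omega

theorem ljMNodeFold_inl (grid : List (List Int)) (d u : Int) (e : Int × Int) (dep : Int)
    (a : Int) (f : List (Int × Int)) :
    List.foldl (ljMNode grid d u e dep) (.inl a) f = .inl a := by
  induction f with
  | nil => rfl
  | cons x t ih => simpa [ljMNode] using ih

theorem ljMNodeFold_bound (grid : List (List Int)) (d u : Int) (e : Int × Int) (dep : Int)
    (f : List (Int × Int)) (v : PySem.Set (Int × Int)) (nxt : List (Int × Int))
    (v' : PySem.Set (Int × Int)) (nxt' : List (Int × Int))
    (h : List.foldl (ljMNode grid d u e dep) (.inr (v, nxt)) f = .inr (v', nxt')) :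
    4 * ljUnvis grid v' + nxt'.length ≤ 4 * ljUnvis grid v + nxt.length := by
  induction f generalizing v nxt with
  | nil => injection h with h; injection h with hv hq; subst hv; subst hq; omega
  | cons x t ih =>
    rw [List.foldl_cons] at h
    cases hstep : ljMNode grid d u e dep (.inr (v, nxt)) x with
    | inl a => rw [hstep, ljMNodeFold_inl] at h; cases h
    | inr p =>
      obtain ⟨v1, q1⟩ := p
      rw [hstep] at h
      have b1 : 4 * ljUnvis grid v1 + q1.length ≤ 4 * ljUnvis grid v + nxt.length := by
        have := ljMFold_bound grid d u e dep x.1 x.2 (ljNbrs x.1 x.2) v nxt v1 q1 (by simpa [ljMNode] using hstep)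
        exact this
      have b2 := ih v1 q1 h
      omega

-- M's level loop, one recursion step per level
def loopM (grid : List (List Int)) (d u : Int) (e : Int × Int)
    (v : PySem.Set (Int × Int)) (frontier : List (Int × Int)) (depth : Int) : Option Int :=
  match frontier with
  | [] => none
  | x :: t =>
    match h : List.foldl (ljMNode grid d u e (depth + 1)) (.inr (v, ([] : List (Int × Int)))) (x :: t) with
    | .inl a => some a
    | .inr (v', nxt) => loopM grid d u e v' nxt (depth + 1)
termination_by 4 * ljUnvis grid v + frontier.length
decreasing_by
  have := ljMNodeFold_bound grid d u e (depth + 1) (x :: t) v [] v' nxt h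
  simp only [List.length_nil, List.length_cons] at *; omega

-- ---- A = M ----

-- one step of A's dir-loop corresponds to one step of M's neighbour-loop, with A's queue
-- split as (already-queued `base`) ++ (M's next frontier, tagged dist+1)
theorem lj_step_corr (grid : List (List Int)) (d u : Int) (e : Int × Int) (cr cc dist : Int)
    (dr dc : Int) (base : List ((Int × Int) × Int)) (v : PySem.Set (Int × Int)) (nxt : List (Int × Int)) :
    ljAStep grid d u e cr cc dist (.inr (v, base ++ nxt.map (fun p => (p, dist + 1)))) (dr, dc)
    = match ljMStep grid d u e (dist + 1) cr cc (.inr (v, nxt)) (cr + dr, cc + dc) with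
      | .inl a => .inl a
      | .inr (v', nxt') => .inr (v', base ++ nxt'.map (fun p => (p, dist + 1))) := by
  simp only [ljAStep, ljMStep, ljIsSafe, ljCellA, ljCellB]
  cases hs : (decide (0 ≤ cr + dr) && decide (cr + dr < (grid.length : Int)) && decide (0 ≤ cc + dc) && decide (cc + dc < (((grid.headD []).length : Nat) : Int))) with
  | false => simp
  | true =>
    simp only [if_true]
    by_cases hb : -d ≤ PySem.List.pyGetD (PySem.List.pyGetD grid (cr + dr) []) (cc + dc) 0 -
        PySem.List.pyGetD (PySem.List.pyGetD grid cr []) cc 0 ∧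
        PySem.List.pyGetD (PySem.List.pyGetD grid (cr + dr) []) (cc + dc) 0 -
        PySem.List.pyGetD (PySem.List.pyGetD grid cr []) cc 0 ≤ u
    · rw [if_neg (show ¬ PySem.List.pyGetD (PySem.List.pyGetD grid (cr + dr) []) (cc + dc) 0 -
            PySem.List.pyGetD (PySem.List.pyGetD grid cr []) cc 0 > u by omega),
          if_neg (show ¬ PySem.List.pyGetD (PySem.List.pyGetD grid (cr + dr) []) (cc + dc) 0 -
            PySem.List.pyGetD (PySem.List.pyGetD grid cr []) cc 0 < -d by omega),
          if_pos hb]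
      by_cases he : ((cr + dr : Int), (cc + dc : Int)) = e
      · rw [if_pos he, if_pos he]
      · rw [if_neg he, if_neg he]
        by_cases hv : PySem.Set.contains v ((cr + dr : Int), (cc + dc : Int)) = true
        · rw [if_pos hv, if_pos hv]
        · rw [if_neg hv, if_neg hv]
          simp [List.map_append, List.append_assoc]
    · by_cases h1 : PySem.List.pyGetD (PySem.List.pyGetD grid (cr + dr) []) (cc + dc) 0 -
          PySem.List.pyGetD (PySem.List.pyGetD grid cr []) cc 0 > u
      · rw [if_pos h1, if_neg hb]
      · have hlt : PySem.List.pyGetD (PySem.List.pyGetD grid (cr + dr) []) (cc + dc) 0 -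
            PySem.List.pyGetD (PySem.List.pyGetD grid cr []) cc 0 < -d := by
          rcases not_and_or.mp hb with h' | h' <;> omega
        rw [if_neg h1, if_pos hlt, if_neg hb]

theorem lj_nbrs_eq (cr cc : Int) : ljNbrs cr cc = ljDirs.map (fun p => (cr + p.1, cc + p.2)) := by
  simp [ljNbrs, ljDirs, sub_eq_add_neg]

-- A's whole dir-loop for one node corresponds to M's whole neighbour-loop for that node
theorem lj_fold_corr (grid : List (List Int)) (d u : Int) (e : Int × Int) (cr cc dist : Int)
    (ds : List (Int × Int)) :
    ∀ (base : List ((Int × Int) × Int)) (v : PySem.Set (Int × Int)) (nxt : List (Int × Int)),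
    List.foldl (ljAStep grid d u e cr cc dist) (.inr (v, base ++ nxt.map (fun p => (p, dist + 1)))) ds
    = match List.foldl (ljMStep grid d u e (dist + 1) cr cc) (.inr (v, nxt)) (ds.map (fun p => (cr + p.1, cc + p.2))) with
      | .inl a => .inl a
      | .inr (v', nxt') => .inr (v', base ++ nxt'.map (fun p => (p, dist + 1))) := by
  induction ds with
  | nil => intro base v nxt; rfl
  | cons x t ih =>
    intro base v nxt
    obtain ⟨dr, dc⟩ := x
    rw [List.map_cons, List.foldl_cons, List.foldl_cons, lj_step_corr]
    cases hB : ljMStep grid d u e (dist + 1) cr cc (.inr (v, nxt)) (cr + dr, cc + dc) with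
    | inl a => simp only [ljAFold_inl, ljMFold_inl]
    | inr p =>
      obtain ⟨v1, nxt1⟩ := p
      exact ih base v1 nxt1

theorem loopM_nil (grid : List (List Int)) (d u : Int) (e : Int × Int)
    (v : PySem.Set (Int × Int)) (depth : Int) : loopM grid d u e v [] depth = none := by
  rw [loopM.eq_def]

theorem loopM_cons (grid : List (List Int)) (d u : Int) (e : Int × Int)
    (v : PySem.Set (Int × Int)) (x : Int × Int) (t : List (Int × Int)) (depth : Int) :
    loopM grid d u e v (x :: t) depth
    = match List.foldl (ljMNode grid d u e (depth + 1)) (.inr (v, ([] : List (Int × Int)))) (x :: t) with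
      | .inl a => some a
      | .inr (v', nxt') => loopM grid d u e v' nxt' (depth + 1) := by
  rw [loopM.eq_def]
  split
  next heq => exact absurd heq (by simp)
  next a b heq =>
    injection heq with h1 h2
    subst h1; subst h2
    split <;> (rename_i h3; rw [h3])

-- main A↔M correspondence: A's queue = (current level, tagged dist) ++ (next level, tagged dist+1)
theorem lj_loop_corr (grid : List (List Int)) (d u : Int) (e : Int × Int) :
    ∀ (n : Nat) (v : PySem.Set (Int × Int)) (f1 nxt : List (Int × Int)) (dist : Int),
    2 * (4 * ljUnvis grid v + f1.length + nxt.length) + (if f1 = [] then 1 else 0) ≤ n →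
    loopA grid d u e v (f1.map (fun p => (p, dist)) ++ nxt.map (fun p => (p, dist + 1)))
    = match List.foldl (ljMNode grid d u e (dist + 1)) (.inr (v, nxt)) f1 with
      | .inl a => some a
      | .inr (v', nxt') => loopM grid d u e v' nxt' (dist + 1) := by
  intro n
  induction n with
  | zero =>
    intro v f1 nxt dist hn
    exfalso
    cases f1 <;> simp at hn
  | succ n ih =>
    intro v f1 nxt dist hn
    match f1 with
    | [] =>
      match nxt with
      | [] =>
        simp only [List.map_nil, List.append_nil, List.foldl_nil]
        rw [loopA, loopM_nil]
      | c :: cs =>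
        have hL : loopA grid d u e v (([] : List (Int × Int)).map (fun p => (p, dist)) ++ (c :: cs).map (fun p => (p, dist + 1)))
            = loopA grid d u e v ((c :: cs).map (fun p => (p, dist + 1)) ++ ([] : List (Int × Int)).map (fun p => (p, (dist + 1) + 1))) := by
          simp
        rw [hL, ih v (c :: cs) [] (dist + 1) (by simp at hn ⊢; omega)]
        change _ = loopM grid d u e v (c :: cs) (dist + 1)
        rw [loopM_cons]
    | x :: t =>
      obtain ⟨cr, cc⟩ := x
      rw [List.map_cons, List.cons_append, loopA]
      have hc := lj_fold_corr grid d u e cr cc dist ljDirs (t.map (fun p => (p, dist))) v nxt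
      rw [← lj_nbrs_eq] at hc
      cases hB : List.foldl (ljMStep grid d u e (dist + 1) cr cc) (.inr (v, nxt)) (ljNbrs cr cc) with
      | inl a =>
        rw [hB] at hc
        split
        next ans hA =>
          rw [hc] at hA
          injection hA with hA
          subst hA
          rw [List.foldl_cons,
            show ljMNode grid d u e (dist + 1) (.inr (v, nxt)) (cr, cc) = .inl a from by simpa [ljMNode] using hB,
            ljMNodeFold_inl]
        next v' q' hA => rw [hc] at hA; cases hA
      | inr p =>
        obtain ⟨v1, nxt1⟩ := p
        rw [hB] at hc
        split
        next ans hA => rw [hc] at hA; cases hA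
        next v' q' hA =>
          rw [hc] at hA
          rw [Sum.inr.injEq, Prod.mk.injEq] at hA
          obtain ⟨rfl, rfl⟩ := hA
          have hb := ljMFold_bound grid d u e (dist + 1) cr cc (ljNbrs cr cc) v nxt v1 nxt1 hB
          rw [ih v1 t nxt1 dist (by
            simp only [List.length_cons, if_neg (List.cons_ne_nil _ _)] at hn
            have hfl : (if t = [] then 1 else 0) ≤ 1 := by split <;> omega
            omega)]
          rw [List.foldl_cons,
            show ljMNode grid d u e (dist + 1) (.inr (v, nxt)) (cr, cc) = .inr (v1, nxt1) from by simpa [ljMNode] using hB]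

-- ---- M = B ----

-- the edge test of both M and B, as the filter predicate of ljNbrsB
def ljCond (grid : List (List Int)) (d u : Int) (cell : Int × Int) (nb : Int × Int) : Bool :=
  decide (0 ≤ nb.1) && decide (nb.1 < (grid.length : Int)) && decide (0 ≤ nb.2) && decide (nb.2 < (((grid.headD []).length : Nat) : Int)) &&
  decide (-d ≤ ljCellB grid nb.1 nb.2 - ljCellB grid cell.1 cell.2) && decide (ljCellB grid nb.1 nb.2 - ljCellB grid cell.1 cell.2 ≤ u)

theorem ljNbrsB_eq (grid : List (List Int)) (d u : Int) (cell : Int × Int) :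
    ljNbrsB grid d u cell = (ljNbrs cell.1 cell.2).filter (ljCond grid d u cell) := rfl

-- character of M's inner fold over one node's candidate list
theorem ljM_node_char (grid : List (List Int)) (d u : Int) (e : Int × Int) (dep cr cc : Int) :
    ∀ (l : List (Int × Int)) (v : PySem.Set (Int × Int)) (nxt : List (Int × Int)),
    (∀ x ∈ nxt, x ∈ v) →
    ((e ∈ l.filter (ljCond grid d u (cr, cc)) →
        List.foldl (ljMStep grid d u e dep cr cc) (.inr (v, nxt)) l = .inl dep) ∧
     (e ∉ l.filter (ljCond grid d u (cr, cc)) →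
        ∃ v' nxt', List.foldl (ljMStep grid d u e dep cr cc) (.inr (v, nxt)) l = .inr (v', nxt') ∧
          (∀ x, x ∈ v' ↔ x ∈ v ∨ x ∈ l.filter (ljCond grid d u (cr, cc))) ∧
          (∀ x, x ∈ nxt' ↔ x ∈ nxt ∨ (x ∈ l.filter (ljCond grid d u (cr, cc)) ∧ x ∉ v)) ∧
          (∀ x ∈ nxt', x ∈ v'))) := by
  intro l
  induction l with
  | nil =>
    intro v nxt hsub
    refine ⟨by simp, fun _ => ⟨v, nxt, by simp, by simp, by simp, hsub⟩⟩
  | cons nb l ih =>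
    intro v nxt hsub
    by_cases hc : ljCond grid d u (cr, cc) nb = true
    · have hfc : (nb :: l).filter (ljCond grid d u (cr, cc)) = nb :: l.filter (ljCond grid d u (cr, cc)) :=
        List.filter_cons_of_pos hc
      have hc' := hc
      simp only [ljCond, Bool.and_eq_true, decide_eq_true_eq] at hc'
      obtain ⟨⟨hbd, hh5⟩, hh6⟩ := hc'
      have hstep : ∀ (st : PySem.Set (Int × Int) × List (Int × Int)),
          ljMStep grid d u e dep cr cc (.inr st) nb =
          (if nb = e then .inl dep
           else if PySem.Set.contains st.1 nb then .inr st
           else .inr (PySem.Set.add st.1 nb, st.2 ++ [nb])) := by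
        intro st
        obtain ⟨w1, w2⟩ := st
        simp only [ljMStep]
        rw [if_pos (by
          simp only [Bool.and_eq_true, decide_eq_true_eq]
          exact hbd),
          if_pos ⟨hh5, hh6⟩]
      by_cases he : nb = e
      · constructor
        · intro _
          rw [List.foldl_cons, hstep, if_pos he, ljMFold_inl]
        · intro hno
          exact absurd (by rw [hfc]; exact List.mem_cons.mpr (Or.inl he.symm)) hno
      · by_cases hv : PySem.Set.contains v nb = true
        · have hvm := (PySem.Set.contains_iff v nb).mp hv
          have hs : List.foldl (ljMStep grid d u e dep cr cc) (.inr (v, nxt)) (nb :: l)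
              = List.foldl (ljMStep grid d u e dep cr cc) (.inr (v, nxt)) l := by
            rw [List.foldl_cons, hstep, if_neg he, if_pos hv]
          obtain ⟨ih1, ih2⟩ := ih v nxt hsub
          constructor
          · intro hmem
            rw [hfc] at hmem
            rcases List.mem_cons.mp hmem with h' | h'
            · exact absurd h'.symm he
            · rw [hs]; exact ih1 h'
          · intro hno
            rw [hfc] at hno
            obtain ⟨v', nxt', heq, hv', hn', hsub'⟩ := ih2 (fun h' => hno (List.mem_cons_of_mem _ h'))
            refine ⟨v', nxt', by rw [hs]; exact heq, ?_, ?_, hsub'⟩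
            · intro x
              rw [hfc, List.mem_cons]
              constructor
              · intro hx; rcases (hv' x).mp hx with h' | h' <;> tauto
              · rintro (h' | rfl | h')
                · exact (hv' x).mpr (Or.inl h')
                · exact (hv' _).mpr (Or.inl hvm)
                · exact (hv' x).mpr (Or.inr h')
            · intro x
              rw [hfc, List.mem_cons]
              constructor
              · intro hx; rcases (hn' x).mp hx with h' | h' <;> tauto
              · rintro (h' | ⟨(rfl | h'), hnv⟩)
                · exact (hn' x).mpr (Or.inl h')
                · exact absurd hvm hnv
                · exact (hn' x).mpr (Or.inr ⟨h', hnv⟩)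
        · have hvm : nb ∉ v := fun h' => hv ((PySem.Set.contains_iff v nb).mpr h')
          have hs : List.foldl (ljMStep grid d u e dep cr cc) (.inr (v, nxt)) (nb :: l)
              = List.foldl (ljMStep grid d u e dep cr cc) (.inr (PySem.Set.add v nb, nxt ++ [nb])) l := by
            rw [List.foldl_cons, hstep, if_neg he, if_neg hv]
          have hsub2 : ∀ x ∈ nxt ++ [nb], x ∈ PySem.Set.add v nb := by
            intro x hx
            rcases List.mem_append.mp hx with h' | h'
            · exact (PySem.Set.mem_add v nb x).mpr (Or.inl (hsub x h'))
            · exact (PySem.Set.mem_add v nb x).mpr (Or.inr (List.mem_singleton.mp h'))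
          obtain ⟨ih1, ih2⟩ := ih (PySem.Set.add v nb) (nxt ++ [nb]) hsub2
          constructor
          · intro hmem
            rw [hfc] at hmem
            rcases List.mem_cons.mp hmem with h' | h'
            · exact absurd h'.symm he
            · rw [hs]; exact ih1 h'
          · intro hno
            rw [hfc] at hno
            obtain ⟨v', nxt', heq, hv', hn', hsub'⟩ := ih2 (fun h' => hno (List.mem_cons_of_mem _ h'))
            refine ⟨v', nxt', by rw [hs]; exact heq, ?_, ?_, hsub'⟩
            · intro x
              rw [hfc, List.mem_cons]
              have hadd := PySem.Set.mem_add v nb x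
              constructor
              · intro hx; rcases (hv' x).mp hx with h' | h'
                · rcases hadd.mp h' with h'' | h'' <;> tauto
                · tauto
              · rintro (h' | rfl | h')
                · exact (hv' x).mpr (Or.inl (hadd.mpr (Or.inl h')))
                · exact (hv' x).mpr (Or.inl (hadd.mpr (Or.inr rfl)))
                · exact (hv' x).mpr (Or.inr h')
            · intro x
              rw [hfc, List.mem_cons]
              have hadd := PySem.Set.mem_add v nb x
              constructor
              · intro hx
                rcases (hn' x).mp hx with h' | ⟨h1', h2'⟩
                · rcases List.mem_append.mp h' with h'' | h''
                  · tauto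
                  · have : x = nb := List.mem_singleton.mp h''
                    subst this; tauto
                · have hxv : x ∉ v := fun h'' => h2' (hadd.mpr (Or.inl h''))
                  tauto
              · rintro (h' | ⟨(rfl | h'), hnv⟩)
                · exact (hn' x).mpr (Or.inl (List.mem_append.mpr (Or.inl h')))
                · exact (hn' x).mpr (Or.inl (List.mem_append.mpr (Or.inr (List.mem_singleton.mpr rfl))))
                · by_cases hxb : x = nb
                  · subst hxb
                    exact (hn' x).mpr (Or.inl (List.mem_append.mpr (Or.inr (List.mem_singleton.mpr rfl))))
                  · refine (hn' x).mpr (Or.inr ⟨h', ?_⟩)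
                    intro h''
                    rcases hadd.mp h'' with h3 | h3
                    · exact hnv h3
                    · exact hxb h3
    · have hfc : (nb :: l).filter (ljCond grid d u (cr, cc)) = l.filter (ljCond grid d u (cr, cc)) :=
        List.filter_cons_of_neg (by simpa using hc)
      have hs : ljMStep grid d u e dep cr cc (.inr (v, nxt)) nb = .inr (v, nxt) := by
        simp only [ljMStep]
        simp only [ljCond, Bool.and_eq_true, decide_eq_true_eq] at hc
        by_cases h1 : (decide (0 ≤ nb.1) && decide (nb.1 < (grid.length : Int)) && decide (0 ≤ nb.2) && decide (nb.2 < (((grid.headD []).length : Nat) : Int))) = true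
        · rw [if_pos h1]
          have h1' := h1
          simp only [Bool.and_eq_true, decide_eq_true_eq] at h1'
          rw [if_neg (fun h2 => hc ⟨⟨h1', h2.1⟩, h2.2⟩)]
        · rw [if_neg h1]
      rw [show List.foldl (ljMStep grid d u e dep cr cc) (.inr (v, nxt)) (nb :: l)
            = List.foldl (ljMStep grid d u e dep cr cc) (.inr (v, nxt)) l from by rw [List.foldl_cons, hs],
          hfc] at *
      exact ih v nxt hsub

-- character of M's whole level fold over the frontier
theorem ljM_level_char (grid : List (List Int)) (d u : Int) (e : Int × Int) (dep : Int) :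
    ∀ (f : List (Int × Int)) (v : PySem.Set (Int × Int)) (nxt : List (Int × Int)),
    (∀ x ∈ nxt, x ∈ v) →
    (((∃ c ∈ f, e ∈ ljNbrsB grid d u c) →
        List.foldl (ljMNode grid d u e dep) (.inr (v, nxt)) f = .inl dep) ∧
     ((¬ ∃ c ∈ f, e ∈ ljNbrsB grid d u c) →
        ∃ v' nxt', List.foldl (ljMNode grid d u e dep) (.inr (v, nxt)) f = .inr (v', nxt') ∧
          (∀ x, x ∈ v' ↔ x ∈ v ∨ ∃ c ∈ f, x ∈ ljNbrsB grid d u c) ∧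
          (∀ x, x ∈ nxt' ↔ x ∈ nxt ∨ ((∃ c ∈ f, x ∈ ljNbrsB grid d u c) ∧ x ∉ v)) ∧
          (∀ x ∈ nxt', x ∈ v'))) := by
  intro f
  induction f with
  | nil =>
    intro v nxt hsub
    refine ⟨by simp, fun _ => ⟨v, nxt, by simp, by simp, by simp, hsub⟩⟩
  | cons c f ih =>
    intro v nxt hsub
    have hnode := ljM_node_char grid d u e dep c.1 c.2 (ljNbrs c.1 c.2) v nxt hsub
    have hfe : ∀ x : Int × Int, x ∈ (ljNbrs c.1 c.2).filter (ljCond grid d u (c.1, c.2)) ↔ x ∈ ljNbrsB grid d u c := by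
      intro x; rw [ljNbrsB_eq]
    by_cases hec : e ∈ ljNbrsB grid d u c
    · constructor
      · intro _
        rw [List.foldl_cons,
          show ljMNode grid d u e dep (.inr (v, nxt)) c = .inl dep from by
            simp only [ljMNode]; exact hnode.1 ((hfe e).mpr hec),
          ljMNodeFold_inl]
      · intro hno
        exact absurd ⟨c, List.mem_cons_self, hec⟩ hno
    · obtain ⟨v1, nxt1, heq1, hv1, hn1, hsub1⟩ := hnode.2 (fun h' => hec ((hfe e).mp h'))
      have hs : List.foldl (ljMNode grid d u e dep) (.inr (v, nxt)) (c :: f)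
          = List.foldl (ljMNode grid d u e dep) (.inr (v1, nxt1)) f := by
        rw [List.foldl_cons, show ljMNode grid d u e dep (.inr (v, nxt)) c = .inr (v1, nxt1) from by
          simp only [ljMNode]; exact heq1]
      obtain ⟨ih1, ih2⟩ := ih v1 nxt1 hsub1
      constructor
      · intro ⟨c', hc', he'⟩
        rcases List.mem_cons.mp hc' with rfl | hc''
        · exact absurd he' hec
        · rw [hs]; exact ih1 ⟨c', hc'', he'⟩
      · intro hno
        have hno' : ¬ ∃ c' ∈ f, e ∈ ljNbrsB grid d u c' :=
          fun ⟨c', hc', he'⟩ => hno ⟨c', List.mem_cons_of_mem _ hc', he'⟩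
        obtain ⟨v', nxt', heq', hv', hn', hsub'⟩ := ih2 hno'
        refine ⟨v', nxt', by rw [hs]; exact heq', ?_, ?_, hsub'⟩
        · intro x
          constructor
          · intro hx
            rcases (hv' x).mp hx with h' | ⟨c', hc', hx'⟩
            · rcases (hv1 x).mp h' with h'' | h''
              · exact Or.inl h''
              · exact Or.inr ⟨c, List.mem_cons_self, (hfe x).mp h''⟩
            · exact Or.inr ⟨c', List.mem_cons_of_mem _ hc', hx'⟩
          · rintro (h' | ⟨c', hc', hx'⟩)
            · exact (hv' x).mpr (Or.inl ((hv1 x).mpr (Or.inl h')))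
            · rcases List.mem_cons.mp hc' with rfl | hc''
              · exact (hv' x).mpr (Or.inl ((hv1 x).mpr (Or.inr ((hfe x).mpr hx'))))
              · exact (hv' x).mpr (Or.inr ⟨c', hc'', hx'⟩)
        · intro x
          constructor
          · intro hx
            rcases (hn' x).mp hx with h' | ⟨⟨c', hc', hx'⟩, hnv1⟩
            · rcases (hn1 x).mp h' with h'' | ⟨h1'', h2''⟩
              · exact Or.inl h''
              · exact Or.inr ⟨⟨c, List.mem_cons_self, (hfe x).mp h1''⟩, h2''⟩
            · have hnv : x ∉ v := fun h'' => hnv1 ((hv1 x).mpr (Or.inl h''))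
              exact Or.inr ⟨⟨c', List.mem_cons_of_mem _ hc', hx'⟩, hnv⟩
          · rintro (h' | ⟨⟨c', hc', hx'⟩, hnv⟩)
            · exact (hn' x).mpr (Or.inl ((hn1 x).mpr (Or.inl h')))
            · rcases List.mem_cons.mp hc' with rfl | hc''
              · exact (hn' x).mpr (Or.inl ((hn1 x).mpr (Or.inr ⟨(hfe x).mpr hx', hnv⟩)))
              · by_cases hx1 : x ∈ v1
                · rcases (hv1 x).mp hx1 with h'' | h''
                  · exact absurd h'' hnv
                  · exact (hn' x).mpr (Or.inl ((hn1 x).mpr (Or.inr ⟨h'', hnv⟩)))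
                · exact (hn' x).mpr (Or.inr ⟨⟨c', hc'', hx'⟩, hx1⟩)

-- membership in B's closure fold
theorem lj_mem_satFold (grid : List (List Int)) (d u : Int) :
    ∀ (l : List (Int × Int)) (acc : PySem.Set (Int × Int)) (x : Int × Int),
    x ∈ List.foldl (fun a c => PySem.Set.update a (ljNbrsB grid d u c)) acc l ↔
      x ∈ acc ∨ ∃ c ∈ l, x ∈ ljNbrsB grid d u c := by
  intro l
  induction l with
  | nil => intro acc x; simp
  | cons c l ih =>
    intro acc x
    rw [List.foldl_cons, ih]
    rw [PySem.Set.mem_update]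
    constructor
    · rintro ((h' | h') | ⟨c', hc', hx'⟩)
      · exact Or.inl h'
      · exact Or.inr ⟨c, List.mem_cons_self, h'⟩
      · exact Or.inr ⟨c', List.mem_cons_of_mem _ hc', hx'⟩
    · rintro (h' | ⟨c', hc', hx'⟩)
      · exact Or.inl (Or.inl h')
      · rcases List.mem_cons.mp hc' with rfl | hc''
        · exact Or.inl (Or.inr hx')
        · exact Or.inr ⟨c', hc'', hx'⟩

theorem loopSat_eq (grid : List (List Int)) (d u : Int) (e : Int × Int)
    (reach : PySem.Set (Int × Int)) (depth : Int) :
    loopSat grid d u e reach depth =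
      if PySem.Set.contains (ljSatNew grid d u reach) e then some (depth + 1)
      else if (ljSatNew grid d u reach).length = reach.length then none
      else loopSat grid d u e (ljSatNew grid d u reach) (depth + 1) := by
  rw [loopSat]

-- main M↔B correspondence
theorem lj_M_sat (grid : List (List Int)) (d u : Int) (e : Int × Int) :
    ∀ (n : Nat) (v : PySem.Set (Int × Int)) (f : List (Int × Int)) (reach : PySem.Set (Int × Int)) (depth : Int),
    ljUnvis grid v ≤ n →
    (∀ x, x ∈ v ↔ x ∈ reach) →
    (∀ x ∈ f, x ∈ v) →
    (∀ a, a ∈ v → a ∉ f → ∀ b ∈ ljNbrsB grid d u a, b ∈ v) →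
    e ∉ v →
    loopM grid d u e v f depth = loopSat grid d u e reach depth := by
  intro n
  induction n using Nat.strong_induction_on with
  | _ n ih =>
    intro v f reach depth hn hvr hfv hclosed hev
    -- the end cell is an admissible neighbour of the reached set iff of the frontier
    have hgen : ∀ y : Int × Int, (∃ c ∈ reach, y ∈ ljNbrsB grid d u c) → y ∉ v → ∃ c ∈ f, y ∈ ljNbrsB grid d u c := by
      rintro y ⟨c, hc, hy⟩ hyv
      by_cases hcf : c ∈ f
      · exact ⟨c, hcf, hy⟩
      · exact absurd (hclosed c ((hvr c).mpr hc) hcf y hy) hyv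
    have hnewmem : ∀ x : Int × Int, x ∈ ljSatNew grid d u reach ↔ x ∈ reach ∨ ∃ c ∈ reach, x ∈ ljNbrsB grid d u c := by
      intro x; exact lj_mem_satFold grid d u reach reach x
    have hEiff : PySem.Set.contains (ljSatNew grid d u reach) e = true ↔ ∃ c ∈ f, e ∈ ljNbrsB grid d u c := by
      rw [PySem.Set.contains_iff, hnewmem]
      constructor
      · rintro (h' | h')
        · exact absurd ((hvr e).mpr h') hev
        · exact hgen e h' hev
      · rintro ⟨c, hc, he⟩
        exact Or.inr ⟨c, (hvr c).mp (hfv c hc), he⟩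
    match f with
    | [] =>
      rw [loopM_nil, loopSat_eq]
      have hnew : ljSatNew grid d u reach = reach := by
        obtain ⟨t, heq, ht⟩ := ljSatFold grid d u reach reach
        have ht0 : t = [] := by
          by_contra hne
          match t, hne, heq, ht with
          | x :: ts, _, heq, ht =>
            obtain ⟨hxnot, c, hc, hxn⟩ := ht x List.mem_cons_self
            have hxv : x ∈ v := hclosed c ((hvr c).mpr hc) (by simp) x hxn
            exact hxnot ((hvr x).mp hxv)
        rw [ljSatNew, heq, ht0, List.append_nil]
      rw [hnew]
      rw [if_neg (fun h' => hev ((hvr e).mpr ((PySem.Set.contains_iff _ _).mp h'))), if_pos rfl]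
    | x :: t =>
      rw [loopM_cons, loopSat_eq]
      have hlevel := ljM_level_char grid d u e (depth + 1) (x :: t) v [] (by simp)
      by_cases hE : ∃ c ∈ x :: t, e ∈ ljNbrsB grid d u c
      · rw [hlevel.1 hE, if_pos (hEiff.mpr hE)]
      · obtain ⟨v', nxt', heq', hv', hn', hsub'⟩ := hlevel.2 hE
        rw [heq', if_neg (fun h' => hE (hEiff.mp h'))]
        -- the saturated set and M's new visited set have the same members
        have hveq : ∀ y : Int × Int, y ∈ v' ↔ y ∈ ljSatNew grid d u reach := by
          intro y
          rw [hv' y, hnewmem y]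
          constructor
          · rintro (h' | ⟨c, hc, hy⟩)
            · exact Or.inl ((hvr y).mp h')
            · exact Or.inr ⟨c, (hvr c).mp (hfv c hc), hy⟩
          · rintro (h' | h')
            · exact Or.inl ((hvr y).mpr h')
            · by_cases hyv : y ∈ v
              · exact Or.inl hyv
              · exact Or.inr (hgen y h' hyv)
        have hnxt : ∀ y : Int × Int, y ∈ nxt' ↔ (y ∈ v' ∧ y ∉ v) := by
          intro y
          rw [hn' y, hv' y]
          constructor
          · rintro (h' | ⟨h1, h2⟩)
            · simp at h'
            · exact ⟨Or.inr h1, h2⟩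
          · rintro ⟨(h1 | h1), h2⟩
            · exact absurd h1 h2
            · exact Or.inr ⟨h1, h2⟩
        -- the prefix decomposition of the saturated set
        obtain ⟨ts, heqs, hts⟩ := ljSatFold grid d u reach reach
        have hnews : ljSatNew grid d u reach = reach ++ ts := heqs
        match nxt', hn', hsub', hnxt with
        | [], hn', hsub', hnxt =>
          -- nothing new: the saturated set equals reach, both loops stop
          have hts0 : ts = [] := by
            by_contra hne
            match ts, hne, hnews, hts with
            | z :: zs, _, hnews, hts =>
              obtain ⟨hznot, c, hc, hzn⟩ := hts z List.mem_cons_self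
              have hzv' : z ∈ v' := by
                rw [hveq z, hnews]; exact List.mem_append.mpr (Or.inr List.mem_cons_self)
              have hzv : z ∈ v := by
                rcases ((hnxt z).not.mp (by simp)) with h'
                by_contra hzv
                exact (by simp : z ∉ ([] : List (Int × Int))) ((hnxt z).mpr ⟨hzv', hzv⟩)
              exact hznot ((hvr z).mp hzv)
          rw [if_pos (by rw [hnews, hts0, List.append_nil])]
          show loopM grid d u e v' [] (depth + 1) = none
          exact loopM_nil grid d u e v' (depth + 1)
        | y :: ys, hn', hsub', hnxt =>
          -- growth: both loops recurse; the new visited set matches the saturated set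
          have hyv' : y ∈ v' := hsub' y List.mem_cons_self
          have hynv : y ∉ v := ((hnxt y).mp List.mem_cons_self).2
          have hynr : y ∉ reach := fun h' => hynv ((hvr y).mpr h')
          have hynew : y ∈ ljSatNew grid d u reach := (hveq y).mp hyv'
          have hts_ne : ts ≠ [] := by
            intro h0
            rw [hnews, h0, List.append_nil] at hynew
            exact hynr hynew
          have hlen : (ljSatNew grid d u reach).length ≠ reach.length := by
            rw [hnews, List.length_append]
            cases ts with
            | nil => exact absurd rfl hts_ne
            | cons z zs => simp
          rw [if_neg hlen]
          show loopM grid d u e v' (y :: ys) (depth + 1) = loopSat grid d u e (ljSatNew grid d u reach) (depth + 1)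
          -- strict decrease of unvisited cells for the induction
          have hcell : y ∈ ljCells grid := by
            rcases ((hn' y).mp List.mem_cons_self) with h' | ⟨⟨c, hc, hy⟩, _⟩
            · simp at h'
            · exact lj_mem_cells_of_nbrsB grid d u c y hy
          have hlt : ljUnvis grid v' < ljUnvis grid v := by
            unfold ljUnvis
            refine lj_countP_lt (ljCells grid) (fun p => !PySem.Set.contains v p)
              (fun p => !PySem.Set.contains v' p) ?_ y hcell ?_ ?_
            · intro a ha
              have hav' : a ∉ v' := by simpa using ha
              have hav : a ∉ v := fun hm => hav' ((hv' a).mpr (Or.inl hm))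
              simpa using hav
            · simpa using hynv
            · simpa using hyv'
          refine ih (ljUnvis grid v') (by omega) v' (y :: ys) (ljSatNew grid d u reach) (depth + 1)
            le_rfl hveq hsub' ?_ ?_
          · -- closure of the new visited set outside the new frontier
            intro a hav' hanf b hb
            have hav : a ∈ v := by
              by_contra hav
              exact hanf ((hnxt a).mpr ⟨hav', hav⟩)
            by_cases haf : a ∈ x :: t
            · exact (hv' b).mpr (Or.inr ⟨a, haf, hb⟩)
            · exact (hv' b).mpr (Or.inl (hclosed a hav haf b hb))
          · -- e still unreached
            intro hev'
            rcases (hv' e).mp hev' with h' | h'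
            · exact hev h'
            · exact hE h'

-- ===== VERDICT (by name: the statement is the Claim_ definition above) =====
theorem least_jumps_spec : Claim_equal_least_jumps := by
  unfold Claim_equal_least_jumps
  intro grid d u s e _ _
  unfold Spec_least_jumps least_jumps least_jumps_alt
  by_cases hse : s = e
  · simp [hse]
  · simp only [hse, if_false]
    have hL : ([((s : Int × Int), (0 : Int))] : List ((Int × Int) × Int))
        = ([s] : List (Int × Int)).map (fun p => (p, (0 : Int))) ++ ([] : List (Int × Int)).map (fun p => (p, (0 : Int) + 1)) := by
      simp
    rw [hL, lj_loop_corr grid d u e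
      (2 * (4 * ljUnvis grid (PySem.Set.ofList [s]) + ([s] : List (Int × Int)).length + 0) + 0)
      (PySem.Set.ofList [s]) [s] [] 0 (by simp)]
    rw [show List.foldl (ljMNode grid d u e (0 + 1)) (.inr (PySem.Set.ofList [s], ([] : List (Int × Int)))) [s]
          = List.foldl (ljMNode grid d u e ((0 : Int) + 1)) (.inr (PySem.Set.ofList [s], ([] : List (Int × Int)))) [s] from rfl]
    rw [← loopM_cons grid d u e (PySem.Set.ofList [s]) s [] 0]
    refine lj_M_sat grid d u e (ljUnvis grid (PySem.Set.ofList [s])) (PySem.Set.ofList [s]) [s] (PySem.Set.ofList [s]) 0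
      le_rfl (fun x => Iff.rfl) (by simp) ?_ ?_
    · intro a ha hna b hb
      exfalso
      exact hna (by simpa using (PySem.Set.mem_ofList [s] a).mp ha)
    · intro hmem
      have hmem' : e = s := by simpa using (PySem.Set.mem_ofList [s] e).mp hmem
      exact hse hmem'.symm
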